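-- pv_equiv track=rewrite | github.com/paulleelife/python_algorithm | Nadongbin/Q6_part3.py | solution
-- ===== SOURCE A (Python) =====
-- from queue import PriorityQueue
--
-- def solution(food_times, k):
--     que = PriorityQueue()
--
--     # lower boundary check
--     if sum(food_times) < k:
--         return -1
--
--     # add elements
--     for i in range(len(food_times)):
--         que.put((food_times[i], i+1))
--
--     prev_food_time = 0
--
--     for i in range(len(food_times)):
--         food_time, food_num  = que.get()
--         food_k = (que.qsize()+1)*(food_time-prev_food_time)
--         if food_k <= k:
--             k -= food_k
--             prev_food_time = food_time
--             if que.empty():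
--                 return -1
--         else:
--             # consider corner case
--             # get all indexes
--             left_food_nums = [food_num]
--             while not que.empty():
--                 left_food_nums += [que.get()[1]]
--
--             left_food_nums = sorted(left_food_nums)
--
--             final_idx = k % len(left_food_nums)
--             final_food_num = int(left_food_nums[final_idx])
--             return final_food_num
--
--
--     answer = -1
--     return answer
-- ===== SOURCE B (Python) =====
-- def solution(food_times, k):
--     total = sum(food_times)
--     if not food_times or total <= k:
--         return -1
--     n = len(food_times)
--     # binary search the largest level T with sum(min(t, T)) <= k
--     lo = k // n                      # sum(min(t, lo)) <= n*lo <= k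
--     hi = max(food_times)             # sum(min(t, hi)) == total > k
--     while hi - lo > 1:
--         mid = (lo + hi) // 2
--         if sum(min(t, mid) for t in food_times) <= k:
--             lo = mid
--         else:
--             hi = mid
--     T = lo
--     used = sum(min(t, T) for t in food_times)
--     rem = [i + 1 for i, t in enumerate(food_times) if t > T]
--     return rem[k - used]
-- ===== Notes on version B (the rewrite author's own statement) =====
-- stated objective: alternative
-- what changed: Instead of simulating the eating in sorted order with a priority queue, B binary-searches the largest level T with sum(min(t,T)) <= k, then reads the answer directly off the original list as the (k - used)-th index among foods with t > T; no heap, no sort, no sequential consumption loop.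
import Mathlib
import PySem

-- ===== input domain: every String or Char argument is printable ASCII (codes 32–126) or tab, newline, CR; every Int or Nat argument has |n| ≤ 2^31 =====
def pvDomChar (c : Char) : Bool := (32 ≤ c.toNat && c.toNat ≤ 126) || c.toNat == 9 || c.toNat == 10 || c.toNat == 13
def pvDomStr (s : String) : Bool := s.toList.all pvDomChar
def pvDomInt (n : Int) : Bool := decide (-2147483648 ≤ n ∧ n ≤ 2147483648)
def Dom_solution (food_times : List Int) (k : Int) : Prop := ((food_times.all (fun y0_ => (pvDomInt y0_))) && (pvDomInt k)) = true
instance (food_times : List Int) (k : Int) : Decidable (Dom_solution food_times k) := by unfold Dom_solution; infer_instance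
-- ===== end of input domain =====

-- B replaces A's priority-queue eating simulation by a parametric binary search on the time level T
-- with sum(min(t,T)) ≤ k, reading the answer off the original list (objective: alternative algorithm);
-- return values agree on every input.

-- ===== PORT A =====
-- Model of queue.PriorityQueue over (time, index) pairs as a list kept sorted by Python's lexicographic
-- tuple order: put = sorted insert, get = head, qsize = length.  Exact here because all inserted pairs
-- have distinct indices, so the pop order is the unique lexicographically sorted order.
def pqPut (q : List (Int × Int)) (x : Int × Int) : List (Int × Int) :=
  PySem.List.insertBy (fun a b => decide (a.1 < b.1) || (!decide (b.1 < a.1) && decide (a.2 < b.2))) x q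

-- the `while not que.empty(): left_food_nums += [que.get()[1]]` loop
def aDrain : List (Int × Int) → List Int → List Int
  | [], acc => acc
  | x :: rest, acc => aDrain rest (acc ++ [x.2])

-- the `for i in range(len(food_times))` loop: each iteration pops the queue head; the queue is never
-- empty at a `get` because A returns -1 as soon as it becomes empty, so recursion on the queue list
-- is the same iteration (the empty case is the loop falling through to `answer = -1`).
def aLoop : List (Int × Int) → Int → Int → Int
  | [], _, _ => -1
  | (food_time, food_num) :: rest, k, prev_food_time =>
    let food_k : Int := ((rest.length : Int) + 1) * (food_time - prev_food_time)
    if food_k ≤ k then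
      if rest = [] then -1 else aLoop rest (k - food_k) food_time
    else
      let left_food_nums := PySem.List.sorted (aDrain rest [food_num]) (fun x => x) false
      PySem.List.pyGetD left_food_nums (PySem.Int.mod k (left_food_nums.length : Int)) 0

def solution (food_times : List Int) (k : Int) : Int :=
  if food_times.sum < k then -1
  else
    let que := (PySem.List.pyRange 0 food_times.length 1).foldl
      (fun q i => pqPut q (PySem.List.pyGetD food_times i 0, i + 1)) []
    aLoop que k 0

-- ===== PORT B =====
-- `sum(min(t, T) for t in food_times)` of Source B
def fsum (ts : List Int) (T : Int) : Int := (ts.map (fun t => min t T)).sum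

-- the `while hi - lo > 1` binary-search loop of Source B
def bLoop (ft : List Int) (k lo hi : Int) : Int :=
  if _h : 1 < hi - lo then
    let mid := PySem.Int.floordiv (lo + hi) 2
    if fsum ft mid ≤ k then bLoop ft k mid hi else bLoop ft k lo mid
  else lo
termination_by (hi - lo).toNat
decreasing_by
  all_goals
    rw [PySem.Int.floordiv_eq_ediv_of_pos (by norm_num : (0:Int) < 2)] at *
    omega

def solution_alt (food_times : List Int) (k : Int) : Int :=
  let total := food_times.sum
  if food_times.isEmpty || decide (total ≤ k) then -1
  else
    let lo := PySem.Int.floordiv k (food_times.length : Int)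
    let hi := (PySem.List.max? food_times (fun x => x)).getD 0
    let T := bLoop food_times k lo hi
    let used := fsum food_times T
    let rem := ((PySem.List.enumerate food_times 0).filter (fun p => decide (T < p.2))).map
      (fun p => p.1 + 1)
    PySem.List.pyGetD rem (k - used) 0

-- ===== PRECONDITION & SPEC =====
def Spec_solution (food_times : List Int) (k : Int) (out : Int) : Prop := out = solution_alt food_times k
instance (food_times : List Int) (k : Int) (out : Int) : Decidable (Spec_solution food_times k out) := by unfold Spec_solution; infer_instance

-- ===== CLAIM (what is proved, stated in full; the proofs are below) =====
def Claim_equal_solution : Prop := ∀ (food_times : List Int) (k : Int), Dom_solution food_times k → Spec_solution food_times k (solution food_times k)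

-- ===== LEMMAS AND PROOFS =====

-- elementary facts about fsum --------------------------------------------------------------------

theorem fsum_mono (ts : List Int) {T T' : Int} (h : T ≤ T') : fsum ts T ≤ fsum ts T' := by
  induction ts with
  | nil => simp [fsum]
  | cons t ts ih =>
    simp only [fsum, List.map_cons, List.sum_cons] at *
    exact add_le_add (min_le_min le_rfl h) ih

theorem fsum_le_sum (ts : List Int) (T : Int) : fsum ts T ≤ ts.sum := by
  induction ts with
  | nil => simp [fsum]
  | cons t ts ih =>
    simp only [fsum, List.map_cons, List.sum_cons] at *
    exact add_le_add (min_le_left t T) ih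

theorem fsum_le_mul (ts : List Int) (T : Int) : fsum ts T ≤ (ts.length : Int) * T := by
  induction ts with
  | nil => simp [fsum]
  | cons t ts ih =>
    simp only [fsum, List.map_cons, List.sum_cons, List.length_cons] at *
    push_cast
    have := min_le_right t T
    linarith

theorem fsum_const (ts : List Int) (T : Int) (h : ∀ x ∈ ts, T ≤ x) : fsum ts T = (ts.length : Int) * T := by
  induction ts with
  | nil => simp [fsum]
  | cons t ts ih =>
    have ht : min t T = T := min_eq_right (h t (by simp))
    have ih' := ih (fun x hx => h x (by simp [hx]))
    simp only [fsum, List.map_cons, List.sum_cons, List.length_cons] at *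
    push_cast
    linarith [ht ▸ le_refl (min t T)]

theorem fsum_eq_sum (ts : List Int) (T : Int) (h : ∀ x ∈ ts, x ≤ T) : fsum ts T = ts.sum := by
  induction ts with
  | nil => simp [fsum]
  | cons t ts ih =>
    have ht : min t T = t := min_eq_left (h t (by simp))
    have ih' := ih (fun x hx => h x (by simp [hx]))
    simp only [fsum, List.map_cons, List.sum_cons] at *
    omega

theorem fsum_perm {ts ts' : List Int} (h : ts.Perm ts') (T : Int) : fsum ts T = fsum ts' T :=
  List.Perm.sum_eq (List.Perm.map _ h)

-- the threshold with fsum T ≤ k < fsum (T+1) is unique ---------------------------------------------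

theorem thresh_unique (ts : List Int) {k T1 T2 : Int}
    (h1 : fsum ts T1 ≤ k) (h1' : k < fsum ts (T1 + 1))
    (h2 : fsum ts T2 ≤ k) (h2' : k < fsum ts (T2 + 1)) : T1 = T2 := by
  by_contra hne
  rcases lt_or_gt_of_ne hne with h | h
  · exact absurd (le_trans (fsum_mono ts (by omega : T1 + 1 ≤ T2)) h2) (by omega)
  · exact absurd (le_trans (fsum_mono ts (by omega : T2 + 1 ≤ T1)) h1) (by omega)

-- B's binary search finds that threshold -----------------------------------------------------------

theorem bLoop_spec (ft : List Int) (k : Int) : ∀ (n : Nat) (lo hi : Int), (hi - lo).toNat ≤ n →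
    fsum ft lo ≤ k → k < fsum ft hi →
    fsum ft (bLoop ft k lo hi) ≤ k ∧ k < fsum ft (bLoop ft k lo hi + 1) := by
  intro n
  induction n with
  | zero =>
    intro lo hi hn h1 h2
    have : lo < hi := by
      by_contra h
      exact absurd (le_trans (fsum_mono ft (by omega : hi ≤ lo)) h1) (by omega)
    omega
  | succ n ih =>
    intro lo hi hn h1 h2
    have hlt : lo < hi := by
      by_contra h
      exact absurd (le_trans (fsum_mono ft (by omega : hi ≤ lo)) h1) (by omega)
    rw [bLoop]
    by_cases hb : 1 < hi - lo
    · simp only [hb, dif_pos]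
      have hmid : PySem.Int.floordiv (lo + hi) 2 = (lo + hi) / 2 :=
        PySem.Int.floordiv_eq_ediv_of_pos (by norm_num)
      rw [hmid]
      by_cases hf : fsum ft ((lo + hi) / 2) ≤ k
      · simp only [hf, if_pos]
        exact ih ((lo + hi) / 2) hi (by omega) hf h2
      · simp only [hf, if_neg, not_false_iff]
        exact ih lo ((lo + hi) / 2) (by omega) h1 (by omega)
    · simp only [hb, dif_neg, not_false_iff]
      have : hi = lo + 1 := by omega
      exact ⟨h1, this ▸ h2⟩

-- the built queue is sorted2 of the enumerated pairs (A's insertion-sort = B's sorted order) -------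

theorem aDrain_eq (q : List (Int × Int)) : ∀ acc, aDrain q acc = acc ++ q.map Prod.snd := by
  induction q with
  | nil => intro acc; simp [aDrain]
  | cons x rest ih => intro acc; simp [aDrain, ih]

theorem pairs_eq (ft : List Int) :
    (PySem.List.pyRange 0 ft.length 1).map (fun i => (PySem.List.pyGetD ft i 0, i + 1))
      = (PySem.List.enumerate ft 0).map (fun p => (p.2, p.1 + 1)) := by
  apply List.ext_getElem
  · simp [PySem.List.length_pyRange_one, PySem.List.length_enumerate]
  · intro j h1 h2
    simp only [List.getElem_map]
    rw [PySem.List.getElem_pyRange_one, PySem.List.getElem_enumerate]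
    simp at h1
    simp [PySem.List.pyGetD_natCast, List.getD_eq_getElem?_getD, h1]

theorem build_eq (ft : List Int) :
    (PySem.List.pyRange 0 ft.length 1).foldl
        (fun q i => pqPut q (PySem.List.pyGetD ft i 0, i + 1)) []
      = PySem.List.sorted2 ((PySem.List.enumerate ft 0).map (fun p => (p.2, p.1 + 1)))
          (fun x => x.1) (fun x => x.2) false := by
  rw [show (fun (q : List (Int × Int)) (i : Int) => pqPut q (PySem.List.pyGetD ft i 0, i + 1))
        = (fun q i => pqPut q ((fun i : Int => (PySem.List.pyGetD ft i 0, i + 1)) i)) from rfl,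
      ← List.foldl_map, pairs_eq]
  rfl

-- sorted2 output is sorted by its first key --------------------------------------------------------

theorem sorted2_pairwise_fst (ps : List (Int × Int)) :
    List.Pairwise (fun a b : Int × Int => a.1 ≤ b.1)
      (PySem.List.sorted2 ps (fun x => x.1) (fun x => x.2) false) := by
  have hb : (fun a b : Int × Int => decide (a.1 < b.1) || (!decide (b.1 < a.1) && decide (a.2 < b.2)))
      = fun a b : Int × Int => decide ((fun x : Int × Int => toLex (x.1, x.2)) a < (fun x : Int × Int => toLex (x.1, x.2)) b) := by
    funext a b
    simp only [Prod.Lex.toLex_lt_toLex]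
    by_cases h1 : a.1 < b.1 <;> by_cases h2 : b.1 < a.1 <;> by_cases h3 : a.2 < b.2 <;>
      simp [h1, h2, h3] <;> omega
  have key : List.Pairwise
      (fun a b : Int × Int => (fun x : Int × Int => toLex (x.1, x.2)) a ≤ (fun x : Int × Int => toLex (x.1, x.2)) b)
      (PySem.List.sorted2 ps (fun x => x.1) (fun x => x.2) false) := by
    show List.Pairwise _ (ps.foldl (fun acc x => PySem.List.insertBy _ x acc) [])
    rw [show (fun a b : Int × Int => decide (a.1 < b.1) || (!decide (b.1 < a.1) && decide (a.2 < b.2)))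
          = _ from hb]
    generalize hacc : ([] : List (Int × Int)) = acc
    have hp : List.Pairwise (fun a b : Int × Int =>
        (fun x : Int × Int => toLex (x.1, x.2)) a ≤ (fun x : Int × Int => toLex (x.1, x.2)) b) acc := by
      rw [← hacc]; exact List.Pairwise.nil
    clear hacc
    induction ps generalizing acc with
    | nil => exact hp
    | cons x ps ih =>
      exact ih _ (PySem.List.insertBy_pairwise_le (fun x : Int × Int => toLex (x.1, x.2)) x acc hp)
  refine key.imp ?_
  intro a b hab
  rcases Prod.Lex.toLex_le_toLex.mp hab with h | ⟨h, _⟩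
  · exact le_of_lt h
  · exact le_of_eq h

-- A's pop loop: if everything fits in k, the queue empties and A returns -1 ------------------------

theorem aLoop_eq_neg_one (q : List (Int × Int)) : ∀ (k prev : Int),
    List.Pairwise (fun a b : Int × Int => a.1 ≤ b.1) q →
    (q.map Prod.fst).sum - (q.length : Int) * prev ≤ k →
    aLoop q k prev = -1 := by
  induction q with
  | nil => intros; rfl
  | cons x rest ih =>
    intro k prev hp hk
    obtain ⟨t, i⟩ := x
    have hall : ∀ p ∈ rest, t ≤ p.1 := (List.pairwise_cons.mp hp).1
    have hrest : ((rest.length : Int)) * t ≤ (rest.map Prod.fst).sum := by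
      have h1 := fsum_const (rest.map Prod.fst) t
        (by intro x hx; obtain ⟨p, hp', rfl⟩ := List.mem_map.mp hx; exact hall p hp')
      have h2 := fsum_le_sum (rest.map Prod.fst) t
      simp only [List.length_map] at h1
      omega
    simp only [List.map_cons, List.sum_cons, List.length_cons] at hk
    push_cast at hk
    have hchunk : ((rest.length : Int) + 1) * (t - prev) ≤ k := by nlinarith
    simp only [aLoop]
    rw [if_pos hchunk]
    rcases hrest' : rest with _ | ⟨y, rest'⟩
    · simp
    · rw [if_neg (by simp)]
      rw [← hrest']
      apply ih (k - ((rest.length : Int) + 1) * (t - prev)) t (List.pairwise_cons.mp hp).2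
      rw [hrest'] at hrest hk ⊢
      simp only [List.length_cons] at *
      push_cast at *
      nlinarith

-- A's pop loop: otherwise it stops, and the stop is characterised by the unique threshold T --------

theorem aLoop_stop (q : List (Int × Int)) : ∀ (k prev : Int),
    q ≠ [] →
    List.Pairwise (fun a b : Int × Int => a.1 ≤ b.1) q →
    k < (q.map Prod.fst).sum - (q.length : Int) * prev →
    ∃ T : Int,
      fsum (q.map Prod.fst) T - (q.length : Int) * prev ≤ k ∧
      k < fsum (q.map Prod.fst) (T + 1) - (q.length : Int) * prev ∧
      aLoop q k prev =
        PySem.List.pyGetD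
          (PySem.List.sorted ((q.filter (fun p => decide (T < p.1))).map Prod.snd) (fun x => x) false)
          (k - (fsum (q.map Prod.fst) T - (q.length : Int) * prev)) 0 := by
  induction q with
  | nil => intro _ _ h; exact absurd rfl h
  | cons x rest ih =>
    intro k prev _ hp hk
    obtain ⟨t, i⟩ := x
    have hall : ∀ p ∈ rest, t ≤ p.1 := (List.pairwise_cons.mp hp).1
    have hallts : ∀ x ∈ rest.map Prod.fst, t ≤ x := by
      intro x hx; obtain ⟨p, hp', rfl⟩ := List.mem_map.mp hx; exact hall p hp'
    set n : Int := (rest.length : Int) + 1 with hn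
    have hnpos : 0 < n := by positivity
    by_cases hc : n * (t - prev) ≤ k
    · -- head fully eaten: recurse
      have hrne : rest ≠ [] := by
        rintro rfl
        simp only [List.map_cons, List.map_nil, List.sum_cons, List.sum_nil, List.length_cons,
          List.length_nil] at hk
        simp only [hn, List.length_nil] at hc
        push_cast at hk hc
        nlinarith
      have hk' : k - n * (t - prev) < (rest.map Prod.fst).sum - (rest.length : Int) * t := by
        simp only [List.map_cons, List.sum_cons, List.length_cons] at hk
        push_cast at hk
        nlinarith
      obtain ⟨T, h1, h2, h3⟩ := ih (k - n * (t - prev)) t hrne (List.pairwise_cons.mp hp).2 hk'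
      have hTt : t ≤ T := by
        by_contra hTt
        rw [not_le] at hTt
        have := fsum_const (rest.map Prod.fst) (T + 1)
          (by intro x hx; have := hallts x hx; omega)
        have hle : ((rest.map Prod.fst).length : Int) * (T + 1) ≤ ((rest.map Prod.fst).length : Int) * t :=
          mul_le_mul_of_nonneg_left (by omega) (by positivity)
        simp only [List.length_map] at this hle
        omega
      refine ⟨T, ?_, ?_, ?_⟩
      · have : fsum ((t, i).1 :: rest.map Prod.fst) T = t + fsum (rest.map Prod.fst) T := by
          simp only [fsum, List.map_cons, List.sum_cons, min_eq_left hTt]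
        simp only [List.map_cons, List.length_cons] at *
        push_cast at *
        nlinarith [this]
      · have : fsum ((t, i).1 :: rest.map Prod.fst) (T + 1) = t + fsum (rest.map Prod.fst) (T + 1) := by
          simp only [fsum, List.map_cons, List.sum_cons, min_eq_left (by omega : t ≤ T + 1)]
        simp only [List.map_cons, List.length_cons] at *
        push_cast at *
        nlinarith [this]
      · have hstep : aLoop ((t, i) :: rest) k prev = aLoop rest (k - n * (t - prev)) t := by
          simp only [aLoop, hn]
          rw [if_pos (by exact_mod_cast hc), if_neg hrne]
        rw [hstep, h3]
        have hfilter : ((t, i) :: rest).filter (fun p => decide (T < p.1))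
            = rest.filter (fun p => decide (T < p.1)) := by
          simp [not_lt.mpr hTt]
        rw [hfilter]
        congr 1
        have hfs : fsum (((t, i) :: rest).map Prod.fst) T = t + fsum (rest.map Prod.fst) T := by
          simp only [fsum, List.map_cons, List.sum_cons, min_eq_left hTt]
        rw [hfs]
        simp only [List.length_cons]
        push_cast
        ring
    · -- stop here: all of q remains
      rw [not_le] at hc
      have hdm := PySem.Int.floordiv_mul_add_mod k n
      have hm0 := PySem.Int.mod_nonneg k hnpos
      have hmlt := PySem.Int.mod_lt k hnpos
      have hTlt : prev + PySem.Int.floordiv k n < t := by nlinarith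
      have hgt : ∀ x ∈ ((t, i) :: rest).map Prod.fst, prev + PySem.Int.floordiv k n < x := by
        intro x hx
        simp only [List.map_cons, List.mem_cons] at hx
        rcases hx with rfl | hx
        · exact hTlt
        · exact lt_of_lt_of_le hTlt (hallts x hx)
      have hlc : ((((t, i) :: rest).length : Int)) = n := by
        simp only [List.length_cons, hn]; push_cast; ring
      have hfsT : fsum (((t, i) :: rest).map Prod.fst) (prev + PySem.Int.floordiv k n)
          = n * (prev + PySem.Int.floordiv k n) := by
        rw [fsum_const _ _ (fun x hx => le_of_lt (hgt x hx))]
        simp only [List.length_map, List.length_cons]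
        push_cast
        rw [hn]
      have hfsT1 : fsum (((t, i) :: rest).map Prod.fst) (prev + PySem.Int.floordiv k n + 1)
          = n * (prev + PySem.Int.floordiv k n + 1) := by
        rw [fsum_const _ _ (fun x hx => by have := hgt x hx; omega)]
        simp only [List.length_map, List.length_cons]
        push_cast
        rw [hn]
      refine ⟨prev + PySem.Int.floordiv k n, ?_, ?_, ?_⟩
      · rw [hfsT, hlc]
        nlinarith
      · rw [hfsT1, hlc]
        nlinarith
      · have hfilter : (((t, i) :: rest).filter (fun p => decide (prev + PySem.Int.floordiv k n < p.1)))
            = (t, i) :: rest := by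
          apply List.filter_eq_self.mpr
          intro p hp'
          have := hgt p.1 (List.mem_map.mpr ⟨p, hp', rfl⟩)
          simpa using this
        have hidx : k - (fsum (((t, i) :: rest).map Prod.fst) (prev + PySem.Int.floordiv k n)
            - ((((t, i) :: rest).length : Int)) * prev) = PySem.Int.mod k n := by
          rw [hfsT, hlc]
          nlinarith
        rw [hfilter, hidx]
        simp only [aLoop]
        rw [if_neg (by rw [← hn]; omega)]
        rw [aDrain_eq]
        have hlen : ((PySem.List.sorted ((i : Int) :: rest.map Prod.snd) (fun x => x) false).length : Int) = n := by
          rw [PySem.List.length_sorted]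
          simp only [List.length_cons, List.length_map]
          push_cast
          rw [hn]
        simp only [List.map_cons, List.singleton_append]
        rw [hlen]

-- the remaining indices, in both programs ----------------------------------------------------------

theorem remaining_eq (ft : List Int) (T : Int) :
    PySem.List.sorted
        (((PySem.List.sorted2 ((PySem.List.enumerate ft 0).map (fun p => (p.2, p.1 + 1)))
            (fun x => x.1) (fun x => x.2) false).filter (fun p => decide (T < p.1))).map Prod.snd)
        (fun x => x) false
      = ((PySem.List.enumerate ft 0).filter (fun p => decide (T < p.2))).map (fun p => p.1 + 1) := by
  apply PySem.List.sorted_eq_of_perm_of_pairwise_lt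
  · -- the target list is a permutation of the unsorted source
    have hq := PySem.List.sorted2_perm ((PySem.List.enumerate ft 0).map (fun p => (p.2, p.1 + 1)))
      (fun x => x.1) (fun x => x.2) false
    have hFM := (hq.filter (fun p => decide (T < p.1))).map Prod.snd
    have heq : ((((PySem.List.enumerate ft 0).map (fun p => (p.2, p.1 + 1))).filter
          (fun p => decide (T < p.1))).map Prod.snd)
        = ((PySem.List.enumerate ft 0).filter (fun p => decide (T < p.2))).map (fun p => p.1 + 1) := by
      rw [List.filter_map, List.map_map]
      rfl
    exact (heq ▸ hFM).symm
  · -- and strictly increasing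
    apply List.Pairwise.map
    · intro p q' (h : p.1 < q'.1); exact (by omega : p.1 + 1 < q'.1 + 1)
    · exact (PySem.List.pairwise_lt_enumerate ft 0).filter _

-- ===== VERDICT (by name: the statement is the Claim_ definition above) =====
theorem solution_spec : Claim_equal_solution := by
  intro ft k _
  unfold Spec_solution solution solution_alt
  by_cases hlt : ft.sum < k
  · rw [if_pos hlt, if_pos (by simp [decide_eq_true_eq]; omega)]
  · rw [if_neg hlt]
    rcases hft : ft with _ | ⟨t0, ft'⟩
    · simp [aLoop]
    rw [← hft]
    have hftne : ft ≠ [] := by rw [hft]; simp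
    rw [build_eq]
    set q := PySem.List.sorted2 ((PySem.List.enumerate ft 0).map (fun p => (p.2, p.1 + 1)))
      (fun x => x.1) (fun x => x.2) false with hqdef
    have hqperm : q.Perm ((PySem.List.enumerate ft 0).map (fun p => (p.2, p.1 + 1))) :=
      PySem.List.sorted2_perm _ _ _ _
    have hts : (q.map Prod.fst).Perm ft := by
      refine List.Perm.trans (hqperm.map Prod.fst) ?_
      rw [List.map_map]
      have : (Prod.fst ∘ (fun p : Int × Int => (p.2, p.1 + 1))) = fun p : Int × Int => p.2 := rfl
      rw [this, show (fun p : Int × Int => p.2) = (fun p : Int × Int => p.2) from rfl,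
        PySem.List.map_snd_enumerate ft 0]
    have hsum : (q.map Prod.fst).sum = ft.sum := hts.sum_eq
    have hlen : (q.length : Int) = (ft.length : Int) := by
      have := hqperm.length_eq
      simp [this, PySem.List.length_enumerate]
    have hpw := sorted2_pairwise_fst ((PySem.List.enumerate ft 0).map (fun p => (p.2, p.1 + 1)))
    rw [← hqdef] at hpw
    by_cases hle : ft.sum ≤ k
    · -- k = sum: queue drains, both return -1
      rw [if_pos (by simp [decide_eq_true_eq]; omega)]
      exact aLoop_eq_neg_one q k 0 hpw (by rw [hsum]; omega)
    · rw [if_neg (by simp [decide_eq_true_eq, hftne]; omega)]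
      -- A stops at the unique threshold
      obtain ⟨T, hA1, hA2, hA3⟩ := aLoop_stop q k 0
        (by
          intro h
          apply hftne
          have := hqperm.length_eq
          rw [h] at this
          simp only [List.length_nil, List.length_map, PySem.List.length_enumerate] at this
          exact List.length_eq_zero_iff.mp this.symm)
        hpw (by rw [hsum]; omega)
      simp only [mul_zero, sub_zero] at hA1 hA2 hA3
      rw [fsum_perm hts] at hA1 hA2 hA3
      -- B's binary search finds a threshold too
      obtain ⟨m, hm⟩ : ∃ m, PySem.List.max? ft (fun x => x) = some m := by
        rcases h : PySem.List.max? ft (fun x => x) with _ | m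
        · exact absurd ((PySem.List.max?_eq_none_iff ft _).mp h) hftne
        · exact ⟨m, rfl⟩
      have hmax : ∀ y ∈ ft, y ≤ m := PySem.List.max?_isMax hm
      have hnft : 0 < (ft.length : Int) := by
        have h0 : ft.length ≠ 0 := fun h => hftne (List.length_eq_zero_iff.mp h)
        omega
      have hlo : fsum ft (PySem.Int.floordiv k (ft.length : Int)) ≤ k := by
        have h1 := fsum_le_mul ft (PySem.Int.floordiv k (ft.length : Int))
        have h2 := PySem.Int.floordiv_mul_add_mod k (ft.length : Int)
        have h3 := PySem.Int.mod_nonneg k hnft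
        nlinarith
      have hhi : k < fsum ft m := by
        rw [fsum_eq_sum ft m hmax]; omega
      obtain ⟨hB1, hB2⟩ := bLoop_spec ft k (m - PySem.Int.floordiv k (ft.length : Int)).toNat
        (PySem.Int.floordiv k (ft.length : Int)) m le_rfl hlo hhi
      -- the two thresholds agree
      have hTeq : T = bLoop ft k (PySem.Int.floordiv k (ft.length : Int)) m :=
        thresh_unique ft hA1 hA2 hB1 hB2
      rw [hm]
      simp only [Option.getD_some]
      subst hTeq
      rw [hA3, hqdef, remaining_eq ft _]
      rfl
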